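-- pv_equiv track=rewrite | github.com/SenFox15/LAB | lab06/block_two.py/block_two.py.py | count_and_sum_digits
-- ===== SOURCE A (Python) =====
-- def count_and_sum_digits(n):
--     if n <= 0:
--         return 0, 0
--     count = 0
--     sum_digits = 0
--     while n > 0:
--         digit = n % 10
--         sum_digits += digit
--         count += 1
--         n //= 10
--     return count, sum_digits
-- ===== SOURCE B (Python) =====
-- def count_and_sum_digits(n):
--     if n <= 0:
--         return 0, 0
--     s = str(n)
--     return len(s), sum(ord(c) - 48 for c in s)
-- ===== Notes on version B (the rewrite author's own statement) =====
-- stated objective: idiomatic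
-- what changed: Replaces the arithmetic digit-extraction loop with the decimal string representation: the count is len(str(n)) and the digit sum is a single pass over the characters.
import Mathlib
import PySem

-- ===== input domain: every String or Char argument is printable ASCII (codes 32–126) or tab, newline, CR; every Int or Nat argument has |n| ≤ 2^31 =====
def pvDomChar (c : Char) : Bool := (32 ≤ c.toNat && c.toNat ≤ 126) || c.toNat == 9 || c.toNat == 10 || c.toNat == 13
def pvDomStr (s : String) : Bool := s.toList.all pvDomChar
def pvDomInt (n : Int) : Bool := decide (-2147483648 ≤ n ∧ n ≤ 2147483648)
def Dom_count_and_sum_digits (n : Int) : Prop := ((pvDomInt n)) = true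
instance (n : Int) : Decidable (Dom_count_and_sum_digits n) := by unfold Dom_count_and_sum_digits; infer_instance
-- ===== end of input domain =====

-- B replaces A's arithmetic digit-extraction loop with the decimal string: count = len(str(n)),
-- digit sum = one pass over its characters (idiomatic; same cost).

-- ===== PORT A =====
-- the while-loop of A: state (n, count, sum_digits)
def pvLoopA (n count sum_digits : Int) : Int × Int :=
  if _h : 0 < n then
    pvLoopA (PySem.Int.floordiv n 10) (count + 1) (sum_digits + PySem.Int.mod n 10)
  else (count, sum_digits)
termination_by n.toNat
decreasing_by
  rw [PySem.Int.floordiv_eq_ediv_of_pos (by omega)]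
  omega

def count_and_sum_digits (n : Int) : Int × Int :=
  if n ≤ 0 then (0, 0) else pvLoopA n 0 0

-- ===== PORT B =====
def count_and_sum_digits_alt (n : Int) : Int × Int :=
  if n ≤ 0 then (0, 0)
  else
    let cs := (PySem.Int.toStr n).toList          -- str(n), traversed as characters
    ((cs.length : Int), cs.foldl (fun acc c => acc + ((c.toNat : Int) - 48)) 0)  -- ord(c) - 48

-- ===== PRECONDITION & SPEC =====
def Spec_count_and_sum_digits (n : Int) (out : Int × Int) : Prop := out = count_and_sum_digits_alt n
instance (n : Int) (out : Int × Int) : Decidable (Spec_count_and_sum_digits n out) := by unfold Spec_count_and_sum_digits; infer_instance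

-- ===== CLAIM (what is proved, stated in full; the proofs are below) =====
def Claim_equal_count_and_sum_digits : Prop := ∀ (n : Int), Dom_count_and_sum_digits n → Spec_count_and_sum_digits n (count_and_sum_digits n)

-- ===== LEMMAS AND PROOFS =====

-- the digit characters of m, most significant first (what Nat.toDigits 10 computes)
def pvChars (m : Nat) : List Char :=
  if _h : m < 10 then [Nat.digitChar m]
  else pvChars (m / 10) ++ [Nat.digitChar (m % 10)]
termination_by m
decreasing_by omega

lemma pvToDigitsCore_eq : ∀ (fuel m : Nat) (l : List Char), m < fuel →
    Nat.toDigitsCore 10 fuel m l = pvChars m ++ l := by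
  intro fuel
  induction fuel with
  | zero => intro m l h; omega
  | succ f ih =>
    intro m l h
    rw [Nat.toDigitsCore]
    by_cases h10 : m / 10 = 0
    · simp only [h10, if_pos]
      rw [pvChars, dif_pos (by omega)]
      have : m % 10 = m := Nat.mod_eq_of_lt (by omega)
      simp [this]
    · rw [if_neg h10]
      have hch : pvChars m = pvChars (m / 10) ++ [Nat.digitChar (m % 10)] := by
        rw [pvChars]; rw [dif_neg (by omega)]
      rw [ih (m / 10) _ (by omega), hch]
      simp

lemma pvToDigits_eq (m : Nat) : Nat.toDigits 10 m = pvChars m :=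
  by simpa using pvToDigitsCore_eq (m + 1) m [] (by omega)

lemma pvDigitChar_toNat (d : Nat) (h : d < 10) : ((Nat.digitChar d).toNat : Int) - 48 = d := by
  interval_cases d <;> decide

-- foldl of the char-sum is the sum of (toNat - 48)
lemma pvFoldl_sum (l : List Char) (a : Int) :
    l.foldl (fun acc c => acc + ((c.toNat : Int) - 48)) a
      = a + (l.map (fun c => (c.toNat : Int) - 48)).sum := by
  induction l generalizing a with
  | nil => simp
  | cons c t ih => simp [List.foldl_cons, ih]; ring

lemma pvLoopA_chars : ∀ (m : Nat), 0 < m → ∀ (c s : Int),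
    pvLoopA (m : Int) c s
      = (c + (pvChars m).length, s + ((pvChars m).map (fun ch => (ch.toNat : Int) - 48)).sum) := by
  intro m
  induction m using Nat.strong_induction_on with
  | _ m ih =>
    intro hm c s
    rw [pvLoopA, dif_pos (by exact_mod_cast hm)]
    have h1 : PySem.Int.floordiv (m : Int) 10 = ((m / 10 : Nat) : Int) := by
      exact_mod_cast PySem.Int.floordiv_natCast m 10
    have h2 : PySem.Int.mod (m : Int) 10 = ((m % 10 : Nat) : Int) := by
      exact_mod_cast PySem.Int.mod_natCast m 10
    rw [h1, h2]
    by_cases h10 : m < 10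
    · have hd : m / 10 = 0 := by omega
      rw [hd]
      rw [pvLoopA, dif_neg (by norm_num)]
      rw [pvChars, dif_pos h10]
      have : m % 10 = m := Nat.mod_eq_of_lt h10
      simp [this, pvDigitChar_toNat m h10]
    · rw [ih (m / 10) (by omega) (by omega)]
      have hch : pvChars m = pvChars (m / 10) ++ [Nat.digitChar (m % 10)] := by
        rw [pvChars]; rw [dif_neg h10]
      rw [hch]
      have hlt : m % 10 < 10 := Nat.mod_lt _ (by omega)
      simp [pvDigitChar_toNat _ hlt]
      constructor
      · ring
      · ring

lemma pvToStr_pos (n : Int) (h : 0 < n) : (PySem.Int.toStr n).toList = pvChars n.toNat := by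
  rw [PySem.Int.toList_toStr, PySem.Int.toChars, if_neg (by omega), pvToDigits_eq]

-- ===== VERDICT (by name: the statement is the Claim_ definition above) =====
theorem count_and_sum_digits_spec : Claim_equal_count_and_sum_digits := by
  intro n _
  unfold Spec_count_and_sum_digits count_and_sum_digits count_and_sum_digits_alt
  by_cases h : n ≤ 0
  · simp [h]
  · rw [if_neg h, if_neg h]
    have hn : n = ((n.toNat : Nat) : Int) := by omega
    rw [pvToStr_pos n (by omega)]
    conv_lhs => rw [hn]
    rw [pvLoopA_chars n.toNat (by omega) 0 0]
    simp [pvFoldl_sum]
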